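-- pv_equiv track=rewrite | github.com/7abushahla/SignBartTF | models/signbart_tf/collect_results.py | determine_keypoint_groups
-- ===== SOURCE A (Python) =====
-- def determine_keypoint_groups(config_joint_idx):
--     """
--     Determine how to group keypoints for normalization.
--     Returns a list of lists for normalization groups.
--     """
--     groups = []
--
--     body_kpts = []
--     left_hand_kpts = []
--     right_hand_kpts = []
--     face_kpts = []
--
--     for idx in config_joint_idx:
--         if idx < 33:
--             body_kpts.append(idx)
--         elif idx < 54:
--             left_hand_kpts.append(idx)
--         elif idx < 75:
--             right_hand_kpts.append(idx)
--         else:  # idx >= 75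
--             face_kpts.append(idx)
--
--     if body_kpts:
--         groups.append(body_kpts)
--     if left_hand_kpts:
--         groups.append(left_hand_kpts)
--     if right_hand_kpts:
--         groups.append(right_hand_kpts)
--     if face_kpts:
--         groups.append(face_kpts)
--
--     return groups
-- ===== SOURCE B (Python) =====
-- def determine_keypoint_groups(config_joint_idx):
--     xs = list(config_joint_idx)
--     body = [i for i in xs if i < 33]
--     left = [i for i in xs if 33 <= i < 54]
--     right = [i for i in xs if 54 <= i < 75]
--     face = [i for i in xs if i >= 75]
--     return [g for g in (body, left, right, face) if g]
-- ===== Notes on version B (the rewrite author's own statement) =====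
-- stated objective: idiomatic
-- what changed: Replaces the single-pass four-accumulator dispatch loop with four independent range-filtered comprehensions, one per group, assembled by a final comprehension that drops empty groups.
import Mathlib
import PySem

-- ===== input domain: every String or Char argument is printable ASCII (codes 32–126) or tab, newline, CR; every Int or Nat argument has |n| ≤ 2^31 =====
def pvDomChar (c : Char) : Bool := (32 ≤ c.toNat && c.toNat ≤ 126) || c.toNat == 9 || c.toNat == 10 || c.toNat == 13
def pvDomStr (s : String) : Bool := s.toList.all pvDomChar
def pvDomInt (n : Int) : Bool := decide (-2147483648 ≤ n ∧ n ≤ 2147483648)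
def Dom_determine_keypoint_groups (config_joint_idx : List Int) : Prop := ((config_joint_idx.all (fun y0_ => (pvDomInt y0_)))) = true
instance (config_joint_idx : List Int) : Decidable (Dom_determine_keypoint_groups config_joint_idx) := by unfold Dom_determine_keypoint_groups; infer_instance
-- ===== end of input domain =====

-- B replaces A's single-pass four-accumulator dispatch loop with four independent
-- range-filtered comprehensions (idiomatic; same cost).

-- ===== PORT A =====
-- A: one loop dispatching each idx into one of four accumulator lists, then
-- appending each non-empty accumulator to `groups` in fixed order.
def determine_keypoint_groups (config_joint_idx : List Int) : List (List Int) :=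
  let st := config_joint_idx.foldl
    (fun (s : List Int × List Int × List Int × List Int) idx =>
      if idx < 33 then (s.1 ++ [idx], s.2.1, s.2.2.1, s.2.2.2)
      else if idx < 54 then (s.1, s.2.1 ++ [idx], s.2.2.1, s.2.2.2)
      else if idx < 75 then (s.1, s.2.1, s.2.2.1 ++ [idx], s.2.2.2)
      else (s.1, s.2.1, s.2.2.1, s.2.2.2 ++ [idx]))
    ([], [], [], [])
  let groups := (if st.1 ≠ [] then [st.1] else []) ++
    (if st.2.1 ≠ [] then [st.2.1] else []) ++
    (if st.2.2.1 ≠ [] then [st.2.2.1] else []) ++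
    (if st.2.2.2 ≠ [] then [st.2.2.2] else [])
  groups

-- ===== PORT B =====
-- B: four independent filters over the materialized list, then keep non-empty groups.
def determine_keypoint_groups_alt (config_joint_idx : List Int) : List (List Int) :=
  let xs := config_joint_idx
  let body := xs.filter (fun i => i < 33)
  let left := xs.filter (fun i => 33 ≤ i ∧ i < 54)
  let right := xs.filter (fun i => 54 ≤ i ∧ i < 75)
  let face := xs.filter (fun i => 75 ≤ i)
  ([body, left, right, face].filter (fun g => g ≠ []))

-- ===== PRECONDITION & SPEC =====
def Spec_determine_keypoint_groups (config_joint_idx : List Int) (out : List (List Int)) : Prop := out = determine_keypoint_groups_alt config_joint_idx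
instance (config_joint_idx : List Int) (out : List (List Int)) : Decidable (Spec_determine_keypoint_groups config_joint_idx out) := by unfold Spec_determine_keypoint_groups; infer_instance

-- ===== CLAIM (what is proved, stated in full; the proofs are below) =====
def Claim_equal_determine_keypoint_groups : Prop := ∀ (config_joint_idx : List Int), Dom_determine_keypoint_groups config_joint_idx → Spec_determine_keypoint_groups config_joint_idx (determine_keypoint_groups config_joint_idx)

-- ===== LEMMAS AND PROOFS =====

-- The foldl state is the initial state with each bucket extended by its filter.
theorem dkg_fold_eq (xs : List Int) (b l r f : List Int) :
    xs.foldl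
      (fun (s : List Int × List Int × List Int × List Int) idx =>
        if idx < 33 then (s.1 ++ [idx], s.2.1, s.2.2.1, s.2.2.2)
        else if idx < 54 then (s.1, s.2.1 ++ [idx], s.2.2.1, s.2.2.2)
        else if idx < 75 then (s.1, s.2.1, s.2.2.1 ++ [idx], s.2.2.2)
        else (s.1, s.2.1, s.2.2.1, s.2.2.2 ++ [idx]))
      (b, l, r, f)
    = (b ++ xs.filter (fun i => i < 33),
       l ++ xs.filter (fun i => decide (33 ≤ i ∧ i < 54)),
       r ++ xs.filter (fun i => decide (54 ≤ i ∧ i < 75)),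
       f ++ xs.filter (fun i => 75 ≤ i)) := by
  induction xs generalizing b l r f with
  | nil => simp
  | cons x xs ih =>
    simp only [List.foldl_cons, List.filter_cons]
    have c1 : (decide (x < 33)) = decide (x < 33) := rfl
    by_cases h1 : x < 33
    · have d2 : (decide (33 ≤ x ∧ x < 54)) = false := by simp; omega
      have d3 : (decide (54 ≤ x ∧ x < 75)) = false := by simp; omega
      have d4 : (decide ((75:Int) ≤ x)) = false := by simp; omega
      simp only [if_pos h1, ih, decide_eq_true h1, d2, d3, d4,
        Bool.false_eq_true, if_false, if_true, List.append_assoc, List.singleton_append]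
    · by_cases h2 : x < 54
      · have d1 : (decide (x < 33)) = false := by simp [h1]
        have d2 : (decide (33 ≤ x ∧ x < 54)) = true := by simp; omega
        have d3 : (decide (54 ≤ x ∧ x < 75)) = false := by simp; omega
        have d4 : (decide ((75:Int) ≤ x)) = false := by simp; omega
        simp only [if_neg h1, if_pos h2, ih, d1, d2, d3, d4,
          Bool.false_eq_true, if_false, if_true, List.append_assoc, List.singleton_append]
      · by_cases h3 : x < 75
        · have d1 : (decide (x < 33)) = false := by simp [h1]
          have d2 : (decide (33 ≤ x ∧ x < 54)) = false := by simp; omega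
          have d3 : (decide (54 ≤ x ∧ x < 75)) = true := by simp; omega
          have d4 : (decide ((75:Int) ≤ x)) = false := by simp; omega
          simp only [if_neg h1, if_neg h2, if_pos h3, ih, d1, d2, d3, d4,
            Bool.false_eq_true, if_false, if_true, List.append_assoc, List.singleton_append]
        · have d1 : (decide (x < 33)) = false := by simp [h1]
          have d2 : (decide (33 ≤ x ∧ x < 54)) = false := by simp; omega
          have d3 : (decide (54 ≤ x ∧ x < 75)) = false := by simp; omega
          have d4 : (decide ((75:Int) ≤ x)) = true := by simp; omega
          simp only [if_neg h1, if_neg h2, if_neg h3, ih, d1, d2, d3, d4,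
            Bool.false_eq_true, if_false, if_true, List.append_assoc, List.singleton_append]

-- ===== VERDICT (by name: the statement is the Claim_ definition above) =====
theorem determine_keypoint_groups_spec : Claim_equal_determine_keypoint_groups := by
  intro xs _
  unfold Spec_determine_keypoint_groups determine_keypoint_groups determine_keypoint_groups_alt
  simp only [dkg_fold_eq, List.nil_append]
  generalize xs.filter (fun i => decide (i < 33)) = B
  generalize xs.filter (fun i => decide (33 ≤ i ∧ i < 54)) = L
  generalize xs.filter (fun i => decide (54 ≤ i ∧ i < 75)) = R
  generalize xs.filter (fun i => decide (75 ≤ i)) = F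
  simp only [List.filter_cons, List.filter_nil]
  by_cases h1 : B = [] <;> by_cases h2 : L = [] <;>
  by_cases h3 : R = [] <;> by_cases h4 : F = [] <;>
    simp [h1, h2, h3, h4]
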